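-- pv_equiv track=rewrite | github.com/womri1998/ProjectEuler300s | problem346.py | repunits_below2
-- ===== SOURCE A (Python) =====
-- def repunits_below2(n, base):
--     res = 0
--     x = 1 + base + base ** 2
--     i = 3
--     while x < n:
--         res += x
--         x += base ** i
--         i += 1
--     return res
-- ===== SOURCE B (Python) =====
-- def repunits_below2(n, base):
--     # Stage 1: find the first digit count K >= 3 whose base-`base` repunit reaches n;
--     # Stage 2: the total is one closed-form geometric sum, no per-term accumulation.
--     if base == 1:
--         # the k-digit repunit in base 1 is k itself: sum of the integers in [3, n)
--         return n * (n - 1) // 2 - 3 if n > 3 else 0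
--     K = 3
--     while (base ** K - 1) // (base - 1) < n:
--         K += 1
--     # sum_{k=3}^{K-1} (base**k - 1)/(base - 1), summed in closed form
--     return ((base ** K - base ** 3) // (base - 1) - (K - 3)) // (base - 1)
-- ===== Notes on version B (the rewrite author's own statement) =====
-- stated objective: alternative
-- what changed: B keeps no running total at all: it first searches for the digit count K of the smallest repunit reaching n, then produces the answer by one closed-form geometric-sum formula ((base**K - base**3)//(base-1) - (K-3))//(base-1) (and a direct arithmetic-series formula for base == 1), whereas A accumulates repunit by repunit.
import Mathlib
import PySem

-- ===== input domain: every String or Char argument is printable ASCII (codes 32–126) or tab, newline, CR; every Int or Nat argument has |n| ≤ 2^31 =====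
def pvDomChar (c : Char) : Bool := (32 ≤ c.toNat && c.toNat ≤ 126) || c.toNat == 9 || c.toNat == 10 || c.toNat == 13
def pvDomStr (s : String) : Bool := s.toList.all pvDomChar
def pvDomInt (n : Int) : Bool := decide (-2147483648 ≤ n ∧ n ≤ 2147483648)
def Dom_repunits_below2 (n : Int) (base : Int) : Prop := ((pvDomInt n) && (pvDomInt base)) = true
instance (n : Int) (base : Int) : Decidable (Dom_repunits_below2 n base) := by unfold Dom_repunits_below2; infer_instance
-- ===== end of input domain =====

-- B keeps no running total: it searches for the digit count K of the first repunit
-- reaching n and then computes the answer by one closed-form geometric-sum formula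
-- (an arithmetic-series formula for base == 1) (objective: alternative).
-- Both loops are rendered with the same fuel bound (enough iterations on Dom whenever
-- the Python loop terminates); for base in {-1, 0} with n >= 2 both Pythons diverge alike.

-- ===== PORT A =====
def repAFuel (n : Int) (base : Int) : Nat → Int → Int → Nat → Int
  | 0, res, _, _ => res
  | f + 1, res, x, i => if x < n then repAFuel n base f (res + x) (x + base ^ i) (i + 1) else res

def repunits_below2 (n : Int) (base : Int) : Int :=
  repAFuel n base (n.toNat + 80) 0 (1 + base + base ^ 2) 3

-- ===== PORT B =====
-- stage 1 of Source B: the first K ≥ 3 whose K-digit repunit reaches n (no total maintained)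
def repBSearch (n : Int) (base : Int) : Nat → Nat → Nat
  | 0, k => k
  | f + 1, k => if PySem.Int.floordiv (base ^ k - 1) (base - 1) < n then repBSearch n base f (k + 1) else k

def repunits_below2_alt (n : Int) (base : Int) : Int :=
  if base = 1 then (if 3 < n then PySem.Int.floordiv (n * (n - 1)) 2 - 3 else 0)
  else
    let K := repBSearch n base (n.toNat + 80) 3
    PySem.Int.floordiv (PySem.Int.floordiv (base ^ K - base ^ 3) (base - 1) - ((K : Int) - 3)) (base - 1)

-- ===== PRECONDITION & SPEC =====
def Spec_repunits_below2 (n : Int) (base : Int) (out : Int) : Prop := out = repunits_below2_alt n base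
instance (n : Int) (base : Int) (out : Int) : Decidable (Spec_repunits_below2 n base out) := by unfold Spec_repunits_below2; infer_instance

-- ===== CLAIM =====
def Claim_equal_repunits_below2 : Prop := ∀ (n : Int) (base : Int), Dom_repunits_below2 n base → Spec_repunits_below2 n base (repunits_below2 n base)

-- ===== LEMMAS AND PROOFS =====

-- Python's // is exact on divisible operands
lemma floordiv_exact (x b : Int) (hb : b ≠ 0) : PySem.Int.floordiv (x * b) b = x := by
  have h := PySem.Int.floordiv_mul_add_mod (x * b) b
  have hm : PySem.Int.mod (x * b) b = 0 := (PySem.Int.mod_eq_zero_iff_dvd _ _).mpr ⟨x, mul_comm x b⟩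
  rw [hm, add_zero] at h
  exact mul_right_cancel₀ hb h

-- the search never decreases its counter
lemma le_search (n base : Int) : ∀ (f k : Nat), k ≤ repBSearch n base f k := by
  intro f
  induction f with
  | zero => intro k; exact le_rfl
  | succ f ih =>
    intro k
    simp only [repBSearch]
    split_ifs
    · exact le_trans (Nat.le_succ k) (ih (k + 1))
    · exact le_rfl

-- base ≠ 1: A's accumulating loop, started with the invariant x*(base-1) = base^i - 1,
-- computes (times (base-1)^2) exactly the geometric sum up to B's search bound.
lemma loopA_closed (n base : Int) (hb : base ≠ 1) :
    ∀ (f : Nat) (acc x : Int) (i : Nat), x * (base - 1) = base ^ i - 1 →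
      (repAFuel n base f acc x i - acc) * (base - 1) ^ 2 =
        base ^ (repBSearch n base f i) - base ^ i - (((repBSearch n base f i : Int)) - i) * (base - 1) := by
  intro f
  induction f with
  | zero => intro acc x i _; simp [repAFuel, repBSearch]
  | succ f ih =>
    intro acc x i hx
    have hb1 : base - 1 ≠ 0 := fun hc => hb (by omega)
    have hr : PySem.Int.floordiv (base ^ i - 1) (base - 1) = x := by
      rw [← hx]; exact floordiv_exact x (base - 1) hb1
    simp only [repAFuel, repBSearch, hr]
    split_ifs with h
    · have hnext := ih (acc + x) (x + base ^ i) (i + 1) (by rw [pow_succ]; linear_combination hx)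
      push_cast at hnext ⊢
      linear_combination hnext + (base - 1) * hx
    · simp

-- base = 1: A sums x = 3, 4, … while x < n
lemma loopA_one (n : Int) : ∀ (f : Nat) (x acc : Int) (i : Nat), (n - x).toNat ≤ f →
    2 * repAFuel n 1 f acc x i = 2 * acc + (if x < n then n * (n - 1) - x * (x - 1) else 0) := by
  intro f
  induction f with
  | zero =>
    intro x acc i hf
    rw [if_neg (by omega : ¬ x < n)]
    simp [repAFuel]
  | succ f ih =>
    intro x acc i hf
    simp only [repAFuel, one_pow]
    split_ifs with h
    · rw [ih (x + 1) (acc + x) (i + 1) (by omega)]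
      split_ifs with h2
      · ring
      · have hx : x = n - 1 := by omega
        subst hx; ring
    · ring

-- ===== VERDICT =====
theorem repunits_below2_spec : Claim_equal_repunits_below2 := by
  intro n base _
  unfold Spec_repunits_below2 repunits_below2 repunits_below2_alt
  by_cases hb : base = 1
  · subst hb
    rw [if_pos rfl]
    have hx : (1 : Int) + 1 + 1 ^ 2 = 3 := by norm_num
    rw [hx]
    have h := loopA_one n (n.toNat + 80) 3 0 3 (by omega)
    by_cases h3 : (3 : Int) < n
    · rw [if_pos h3]
      rw [if_pos h3] at h
      have hdvd : (2 : Int) ∣ n * (n - 1) := by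
        rcases Int.even_or_odd n with he | ho
        · exact Dvd.dvd.mul_right he.two_dvd _
        · obtain ⟨m, hm⟩ := ho
          exact Dvd.dvd.mul_left ⟨m, by omega⟩ _
      obtain ⟨q, hq⟩ := hdvd
      have hfd : PySem.Int.floordiv (n * (n - 1)) 2 = q := by
        rw [hq, mul_comm]; exact floordiv_exact q 2 (by norm_num)
      rw [hfd]
      linarith [hq]
    · rw [if_neg h3]
      rw [if_neg (by omega : ¬ (3 : Int) < n)] at h
      linarith
  · rw [if_neg hb]
    have hb1 : base - 1 ≠ 0 := fun hc => hb (by omega)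
    set F := n.toNat + 80 with hF
    set K := repBSearch n base F 3 with hK
    have hK3 : 3 ≤ K := le_search n base F 3
    have hA := loopA_closed n base hb F 0 (1 + base + base ^ 2) 3 (by ring)
    rw [← hK, sub_zero] at hA
    set A := repAFuel n base F 0 (1 + base + base ^ 2) 3 with hAdef
    -- (base - 1) ∣ base ^ K - base ^ 3
    have hdvd : ∃ q : Int, base ^ K - base ^ 3 = q * (base - 1) := by
      have hm : ∀ m : Nat, ∃ q : Int, base ^ m - 1 = q * (base - 1) := by
        intro m
        induction m with
        | zero => exact ⟨0, by simp⟩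
        | succ m ihm =>
          obtain ⟨q, hq⟩ := ihm
          exact ⟨base * q + 1, by rw [pow_succ]; linear_combination base * hq⟩
      obtain ⟨q, hq⟩ := hm (K - 3)
      refine ⟨base ^ 3 * q, ?_⟩
      have : base ^ K = base ^ 3 * base ^ (K - 3) := by
        rw [← pow_add]; congr 1; omega
      rw [this]; linear_combination base ^ 3 * hq
    obtain ⟨q, hq⟩ := hdvd
    show A = PySem.Int.floordiv (PySem.Int.floordiv (base ^ K - base ^ 3) (base - 1) - ((K : Int) - 3)) (base - 1)
    have hfd1 : PySem.Int.floordiv (base ^ K - base ^ 3) (base - 1) = q := by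
      rw [hq]; exact floordiv_exact q (base - 1) hb1
    rw [hfd1]
    have hkey : q - ((K : Int) - 3) = A * (base - 1) := by
      have : A * (base - 1) ^ 2 = q * (base - 1) - ((K : Int) - 3) * (base - 1) := by
        rw [← hq]; linear_combination hA
      have h2 : (q - ((K : Int) - 3)) * (base - 1) = (A * (base - 1)) * (base - 1) := by ring_nf; ring_nf at this; linarith
      exact mul_right_cancel₀ hb1 h2
    rw [hkey, floordiv_exact A (base - 1) hb1]
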